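-- pv_equiv track=rewrite | github.com/jcraig949jfi/Prometheus | agents/hephaestus/humanreadable/Renormalization---Ecosystem_Dynamics---Nash_Equilibrium/tool.py | _build_causal_graph
-- ===== SOURCE A (Python) =====
-- from typing import Dict, Set, Tuple
-- from typing import List, Dict, Tuple, Set
--
-- def _build_causal_graph(props: List[str]) -> List[Tuple[int, int]]:
--     edges = []
--     causal_cues = ['because', 'leads to', 'results in', 'causes', 'therefore', 'thus', 'so']
--
--     for i, p1 in enumerate(props):
--         for j, p2 in enumerate(props):
--             if i != j:
--                 p1_lower = p1.lower()
--                 p2_lower = p2.lower()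
--                 # Check if p1 causally supports p2
--                 for cue in causal_cues:
--                     if cue in p1_lower or cue in p2_lower:
--                         edges.append((i, j))
--                         break
--     return edges
-- ===== SOURCE B (Python) =====
-- def _build_causal_graph(props):
--     causal_cues = ['because', 'leads to', 'results in', 'causes', 'therefore', 'thus', 'so']
--     has_cue = [any(cue in p.lower() for cue in causal_cues) for p in props]
--     cue_indices = [k for k, h in enumerate(has_cue) if h]
--     n = len(props)
--     edges = []
--     for i, h in enumerate(has_cue):
--         if h:
--             edges.extend((i, j) for j in range(n) if j != i)
--         else:
--             edges.extend((i, j) for j in cue_indices)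
--     return edges
-- ===== Notes on version B (the rewrite author's own statement) =====
-- stated objective: faster
-- what changed: B lowercases and cue-tests each prop once into a has_cue table plus a precomputed cue-index list, then emits each row either as all j != i (cue row) or by copying the cue-index list (non-cue row), instead of A's per-pair re-lowercasing and cue re-scan inside the nested loops.
import Mathlib
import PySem

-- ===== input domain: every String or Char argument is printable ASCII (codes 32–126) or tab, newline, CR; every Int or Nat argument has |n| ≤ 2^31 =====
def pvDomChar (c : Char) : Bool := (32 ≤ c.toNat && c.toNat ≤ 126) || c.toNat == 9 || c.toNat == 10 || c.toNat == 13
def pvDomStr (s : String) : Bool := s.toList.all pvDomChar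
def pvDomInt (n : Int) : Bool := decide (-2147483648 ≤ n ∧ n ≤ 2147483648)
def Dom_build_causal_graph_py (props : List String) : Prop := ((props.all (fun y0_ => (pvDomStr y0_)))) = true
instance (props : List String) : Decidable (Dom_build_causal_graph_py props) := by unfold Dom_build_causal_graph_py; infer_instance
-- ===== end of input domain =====

-- B precomputes per-prop cue flags and a cue-index list once, so the non-cue rows copy a filtered index list instead of re-lowercasing and re-scanning every prop per pair (objective: faster).


-- ===== PORT A =====
def pvCausalCues : List String := ["because", "leads to", "results in", "causes", "therefore", "thus", "so"]

-- the inner 'for cue in causal_cues: … break' loop of A, step for step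
def pvCueLoop (cues : List String) (p1l p2l : String) (edges : List (Int × Int)) (i j : Int) :
    List (Int × Int) :=
  match cues with
  | [] => edges
  | c :: rest =>
      if PySem.Str.isIn c p1l || PySem.Str.isIn c p2l then edges ++ [(i, j)]
      else pvCueLoop rest p1l p2l edges i j

def build_causal_graph_py (props : List String) : List (Int × Int) :=
  (PySem.List.enumerate props).foldl (fun edges ip =>
    (PySem.List.enumerate props).foldl (fun edges jp =>
      if ip.1 ≠ jp.1 then
        pvCueLoop pvCausalCues (PySem.Str.lower ip.2) (PySem.Str.lower jp.2) edges ip.1 jp.1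
      else edges) edges) []

-- ===== PORT B =====
def pvCausalCuesB : List String := ["because", "leads to", "results in", "causes", "therefore", "thus", "so"]

-- any(cue in p.lower() for cue in causal_cues)
def pvHasCue (p : String) : Bool := pvCausalCuesB.any (fun c => PySem.Str.isIn c (PySem.Str.lower p))

-- has_cue = [any(cue in p.lower() for cue in causal_cues) for p in props]
def pvHasCueList (props : List String) : List Bool := props.map pvHasCue

-- cue_indices = [k for k, h in enumerate(has_cue) if h]
def pvCueIndices (props : List String) : List Int :=
  (PySem.List.enumerate (pvHasCueList props)).filterMap (fun kh => if kh.2 then some kh.1 else none)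

def build_causal_graph_py_alt (props : List String) : List (Int × Int) :=
  (PySem.List.enumerate (pvHasCueList props)).foldl (fun edges ih =>
    if ih.2 then
      edges ++ (PySem.List.pyRange 0 (props.length : Int) 1).filterMap
        (fun j => if j ≠ ih.1 then some (ih.1, j) else none)
    else
      edges ++ (pvCueIndices props).map (fun j => (ih.1, j))) []

-- ===== PRECONDITION & SPEC =====
def Spec_build_causal_graph_py (props : List String) (out : List (Int × Int)) : Prop := out = build_causal_graph_py_alt props
instance (props : List String) (out : List (Int × Int)) : Decidable (Spec_build_causal_graph_py props out) := by unfold Spec_build_causal_graph_py; infer_instance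

-- ===== CLAIM (what is proved, stated in full; the proofs are below) =====
def Claim_equal_build_causal_graph_py : Prop := ∀ (props : List String), Dom_build_causal_graph_py props → Spec_build_causal_graph_py props (build_causal_graph_py props)

-- ===== LEMMAS AND PROOFS =====

-- canonical row of A for source index i with snd p1
def pvRowA (props : List String) (i : Int) (p1 : String) : List (Int × Int) :=
  (PySem.List.enumerate props).filterMap (fun jp =>
    if i ≠ jp.1 ∧ (pvHasCue p1 || pvHasCue jp.2) then some (i, jp.1) else none)

theorem pvCueLoop_eq (cues : List String) (p1l p2l : String) (edges : List (Int × Int)) (i j : Int) :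
    pvCueLoop cues p1l p2l edges i j =
      if cues.any (fun c => PySem.Str.isIn c p1l || PySem.Str.isIn c p2l) then edges ++ [(i, j)]
      else edges := by
  induction cues with
  | nil => simp [pvCueLoop]
  | cons c rest ih =>
      have hstep : pvCueLoop (c :: rest) p1l p2l edges i j =
          if (PySem.Str.isIn c p1l || PySem.Str.isIn c p2l) = true then edges ++ [(i, j)]
          else pvCueLoop rest p1l p2l edges i j := rfl
      rw [hstep, ih, List.any_cons]
      cases hc : (PySem.Str.isIn c p1l || PySem.Str.isIn c p2l) <;> simp

theorem pvAny_or (l : List String) (p q : String → Bool) :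
    l.any (fun c => p c || q c) = (l.any p || l.any q) := by
  induction l with
  | nil => simp
  | cons c rest ih =>
      simp only [List.any_cons, ih]
      cases p c <;> cases q c <;> simp

theorem pvInnerA (props : List String) (ip : Int × String) (edges : List (Int × Int)) :
    (PySem.List.enumerate props).foldl (fun edges jp =>
      if ip.1 ≠ jp.1 then
        pvCueLoop pvCausalCues (PySem.Str.lower ip.2) (PySem.Str.lower jp.2) edges ip.1 jp.1
      else edges) edges = edges ++ pvRowA props ip.1 ip.2 := by
  have hcue : ∀ p2 : String,
      pvCausalCues.any (fun c => PySem.Str.isIn c (PySem.Str.lower ip.2) || PySem.Str.isIn c (PySem.Str.lower p2))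
        = (pvHasCue ip.2 || pvHasCue p2) := by
    intro p2
    rw [pvAny_or]
    rfl
  rw [pvRowA]
  generalize PySem.List.enumerate props = l
  induction l generalizing edges with
  | nil => simp
  | cons jp rest ih =>
      rw [List.foldl_cons]
      by_cases hne : ip.1 ≠ jp.1
      · rw [if_pos hne, pvCueLoop_eq, hcue]
        by_cases hc : (pvHasCue ip.2 || pvHasCue jp.2) = true
        · rw [if_pos hc, ih]
          simp only [List.filterMap_cons]
          rw [if_pos (show ip.1 ≠ jp.1 ∧ (pvHasCue ip.2 || pvHasCue jp.2) = true from ⟨hne, hc⟩)]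
          simp
        · rw [if_neg hc, ih]
          simp only [List.filterMap_cons]
          rw [if_neg (show ¬(ip.1 ≠ jp.1 ∧ (pvHasCue ip.2 || pvHasCue jp.2) = true) from fun h => hc h.2)]
      · rw [if_neg hne, ih]
        simp only [List.filterMap_cons]
        rw [if_neg (show ¬(ip.1 ≠ jp.1 ∧ (pvHasCue ip.2 || pvHasCue jp.2) = true) from fun h => hne h.1)]

theorem pvFlatMap_congr_mem {α β : Type} {l : List α} {f g : α → List β}
    (h : ∀ x ∈ l, f x = g x) : l.flatMap f = l.flatMap g := by
  induction l with
  | nil => rfl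
  | cons x rest ih =>
      simp only [List.flatMap_cons, h x (List.mem_cons_self),
        ih (fun y hy => h y (List.mem_cons_of_mem x hy))]

theorem pvA_eq (props : List String) :
    build_causal_graph_py props =
      (PySem.List.enumerate props).flatMap (fun ip => pvRowA props ip.1 ip.2) := by
  rw [build_causal_graph_py]
  rw [PySem.List.foldl_congr_mem _ _ (fun edges ip => edges ++ pvRowA props ip.1 ip.2) _
    (by intro acc ip _; exact pvInnerA props ip acc)]
  rw [PySem.List.foldl_append_eq_flatMap]
  simp

-- enumerate of a mapped list
theorem pvEnum_map {α β : Type} (f : α → β) (xs : List α) (s : Int) :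
    PySem.List.enumerate (xs.map f) s = (PySem.List.enumerate xs s).map (fun p => (p.1, f p.2)) := by
  induction xs generalizing s with
  | nil => simp [PySem.List.enumerate_nil]
  | cons x rest ih => simp [PySem.List.enumerate_cons, ih]

theorem pvFilterMap_congr_mem {α β : Type} {l : List α} {f g : α → Option β}
    (h : ∀ x ∈ l, f x = g x) : l.filterMap f = l.filterMap g := by
  induction l with
  | nil => rfl
  | cons x rest ih =>
      simp only [List.filterMap_cons, h x (List.mem_cons_self),
        ih (fun y hy => h y (List.mem_cons_of_mem x hy))]

theorem pvCueIndices_eq (props : List String) :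
    pvCueIndices props =
      (PySem.List.enumerate props).filterMap
        (fun jp => if pvHasCue jp.2 then some jp.1 else none) := by
  rw [pvCueIndices, pvHasCueList, pvEnum_map, List.filterMap_map]
  rfl

theorem pvB_eq (props : List String) :
    build_causal_graph_py_alt props =
      (PySem.List.enumerate props).flatMap (fun ip =>
        if pvHasCue ip.2 then
          (PySem.List.pyRange 0 (props.length : Int) 1).filterMap
            (fun j => if j ≠ ip.1 then some (ip.1, j) else none)
        else
          ((PySem.List.enumerate props).filterMap
            (fun jp => if pvHasCue jp.2 then some jp.1 else none)).map (fun j => (ip.1, j))) := by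
  rw [build_causal_graph_py_alt]
  rw [PySem.List.foldl_congr_mem _ _ (fun edges ih =>
      edges ++ (if ih.2 then
        (PySem.List.pyRange 0 (props.length : Int) 1).filterMap
          (fun j => if j ≠ ih.1 then some (ih.1, j) else none)
      else
        (pvCueIndices props).map (fun j => (ih.1, j)))) _
    (by intro acc ih _
        by_cases h : ih.2 = true <;> simp [h])]
  rw [PySem.List.foldl_append_eq_flatMap]
  rw [pvHasCueList, pvEnum_map, List.flatMap_map, pvCueIndices_eq]
  simp

theorem pvRow_has (props : List String) (i : Int) (p1 : String) (h : pvHasCue p1 = true) :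
    pvRowA props i p1 =
      (PySem.List.pyRange 0 (props.length : Int) 1).filterMap
        (fun j => if j ≠ i then some (i, j) else none) := by
  have hfst := PySem.List.map_fst_enumerate (xs := props) (s := 0)
  rw [show (0 : Int) + props.length = (props.length : Int) by omega] at hfst
  rw [pvRowA, ← hfst, List.filterMap_map]
  apply pvFilterMap_congr_mem
  intro jp _
  simp only [Function.comp, h, Bool.true_or, and_true]
  by_cases hne : jp.1 ≠ i
  · rw [if_pos (Ne.symm hne), if_pos hne]
  · rw [ne_eq, not_not] at hne
    simp [hne]

theorem pvRow_nohas (props : List String) (k : Nat) (hk : k < props.length)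
    (h : pvHasCue props[k] = false) :
    pvRowA props (k : Int) props[k] =
      ((PySem.List.enumerate props).filterMap
        (fun jp => if pvHasCue jp.2 then some jp.1 else none)).map (fun j => ((k : Int), j)) := by
  rw [pvRowA, List.map_filterMap]
  apply pvFilterMap_congr_mem
  intro jp hjp
  rw [PySem.List.mem_enumerate_iff] at hjp
  obtain ⟨m, hm, rfl⟩ := hjp
  simp only [h, Bool.false_or]
  by_cases hc : pvHasCue props[m] = true
  · have hkm : ¬ k = m := by
      intro e
      subst e
      rw [hc] at h
      exact absurd h (by simp)
    simp [hc, hkm]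
  · simp only [Bool.not_eq_true] at hc
    simp [hc]

-- ===== VERDICT (by name: the statement is the Claim_ definition above) =====
theorem build_causal_graph_py_spec : Claim_equal_build_causal_graph_py := by
  intro props _
  show build_causal_graph_py props = build_causal_graph_py_alt props
  rw [pvA_eq, pvB_eq]
  apply pvFlatMap_congr_mem
  intro ip hip
  rw [PySem.List.mem_enumerate_iff] at hip
  obtain ⟨k, hk, rfl⟩ := hip
  simp only [zero_add]
  by_cases h : pvHasCue props[k] = true
  · rw [if_pos h]
    exact pvRow_has props _ _ h
  · simp only [Bool.not_eq_true] at h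
    rw [if_neg (by simp [h])]
    exact pvRow_nohas props k hk h
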